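-- pv_equiv track=rewrite | github.com/ebylmz/gtu-cse | CSE321 - Introduction to Algorithm Design/hw05/src/q4.py | maxScoreDP
-- ===== SOURCE A (Python) =====
-- def maxScoreDP(grid):
--     rows = len(grid)       # number of rows
--     cols = len(grid[0])    # number of columns
--
--     dp = [[0 for i in range(cols)] for j in range(rows)]
--
--     dp[0][0] = grid[0][0]
--
--     # fill for the first row
--     for i in range(1, rows):
--         dp[i][0] = dp[i - 1][0] + grid[i][0]
--     # fill for the first column
--     for i in range(1, cols):
--         dp[0][i] = dp[0][i - 1] + grid[0][i]
--
--     # fill for the intermediate cells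
--     for i in range(1, rows):
--         for j in range(1, cols):
--             # grid[i][j] can be reached from grid[i - 1][j] or grid[i][j - 1]
--             dp[i][j] = grid[i][j] + max(dp[i - 1][j], dp[i][j - 1])
--
--     # derive the path by following maximum points
--     i, j = rows - 1, cols - 1
--     path = [convertPathFormat(i, j)]
--     while i > 0 and j > 0:
--         if dp[i][j - 1] > dp[i - 1][j]:
--             j = j - 1   # reverse move right
--         else:
--             i = i - 1   # reverse move down
--         path.append(convertPathFormat(i, j))
--
--     while i > 0:
--         i = i - 1
--         path.append(convertPathFormat(i, j))
--
--     while j > 0: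
--         j = j - 1
--         path.append(convertPathFormat(i, j))
--
--     path.reverse()
--
--     return dp[rows - 1][cols - 1], path
--
-- def convertPathFormat(r, c):
--     return "A" + str(r + 1) + "B" + str(c + 1)
-- ===== SOURCE B (Python) =====
-- def convertPathFormat(r, c):
--     return "A" + str(r + 1) + "B" + str(c + 1)
--
-- def maxScoreDP(grid):
--     rows = len(grid)
--     cols = len(grid[0])
--
--     # forward fill keeping only one dp row, plus a parent matrix of booleans
--     # (True = reached from above, False = from the left; ties go up, like A's backtrack)
--     row = [0] * cols
--     row[0] = grid[0][0]
--     for j in range(1, cols):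
--         row[j] = row[j - 1] + grid[0][j]
--     parent = [[False] * cols]
--     for i in range(1, rows):
--         prev = row
--         row = [prev[0] + grid[i][0]] + [0] * (cols - 1)
--         par = [True] + [False] * (cols - 1)
--         for j in range(1, cols):
--             if prev[j] >= row[j - 1]:
--                 row[j] = grid[i][j] + prev[j]
--                 par[j] = True
--             else:
--                 row[j] = grid[i][j] + row[j - 1]
--         parent.append(par)
--
--     # single backward walk along the parent pointers
--     i, j = rows - 1, cols - 1
--     path = [convertPathFormat(i, j)]
--     while i or j:
--         if parent[i][j]:
--             i -= 1
--         else: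
--             j -= 1
--         path.append(convertPathFormat(i, j))
--     path.reverse()
--     return row[cols - 1], path
-- ===== Notes on version B (the rewrite author's own statement) =====
-- stated objective: faster
-- what changed: B records a parent-pointer matrix (up/left, ties up) during a fill that keeps only one dp row of ints, then reconstructs the path with a single parent-following loop, instead of A's full dp int matrix plus three backtracking while-loops that re-compare dp values.
import Mathlib
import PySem

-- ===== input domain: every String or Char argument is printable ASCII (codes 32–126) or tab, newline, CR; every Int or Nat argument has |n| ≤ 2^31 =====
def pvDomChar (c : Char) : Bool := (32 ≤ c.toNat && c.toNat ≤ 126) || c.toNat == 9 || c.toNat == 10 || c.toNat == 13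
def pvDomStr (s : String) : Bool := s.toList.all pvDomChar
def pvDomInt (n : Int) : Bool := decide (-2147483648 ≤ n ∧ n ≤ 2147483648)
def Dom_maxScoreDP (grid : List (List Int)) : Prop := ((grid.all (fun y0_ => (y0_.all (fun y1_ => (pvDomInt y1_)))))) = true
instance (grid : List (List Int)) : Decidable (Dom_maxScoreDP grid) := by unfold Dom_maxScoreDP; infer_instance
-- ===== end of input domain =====

-- B replaces A's full dp matrix + three re-comparing backtrack loops by a one-row dp fill that
-- records parent pointers (ties go up, like A) and a single parent-following reconstruction loop.

-- ===== PORT A =====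
def cvtPF (r c : Nat) : String :=
  "A" ++ PySem.Int.toStr ((r : Int) + 1) ++ "B" ++ PySem.Int.toStr ((c : Int) + 1)

-- dp[i][j] read / write on a list-of-lists, exactly Python's indexing (always in range under Pre_)
def getC (dp : List (List Int)) (i j : Nat) : Int := (dp.getD i []).getD j 0

def setC (dp : List (List Int)) (i j : Nat) (v : Int) : List (List Int) :=
  dp.set i ((dp.getD i []).set j v)

def gridF (grid : List (List Int)) : Nat → Nat → Int := fun i j => getC grid i j

-- for i in range(1, rows): dp[i][0] = dp[i-1][0] + grid[i][0]
def aColFill (g : Nat → Nat → Int) (dp : List (List Int)) (n : Nat) : List (List Int) :=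
  (List.range' 1 n).foldl (fun dp i => setC dp i 0 (getC dp (i - 1) 0 + g i 0)) dp

-- for i in range(1, cols): dp[0][i] = dp[0][i-1] + grid[0][i]
def aRowFill (g : Nat → Nat → Int) (dp : List (List Int)) (m : Nat) : List (List Int) :=
  (List.range' 1 m).foldl (fun dp j => setC dp 0 j (getC dp 0 (j - 1) + g 0 j)) dp

-- inner loop: for j in range(1, cols): dp[i][j] = grid[i][j] + max(dp[i-1][j], dp[i][j-1])
def aInner (g : Nat → Nat → Int) (dp : List (List Int)) (i m : Nat) : List (List Int) :=
  (List.range' 1 m).foldl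
    (fun dp j => setC dp i j (g i j + max (getC dp (i - 1) j) (getC dp i (j - 1)))) dp

def aMain (g : Nat → Nat → Int) (dp : List (List Int)) (n m : Nat) : List (List Int) :=
  (List.range' 1 n).foldl (fun dp i => aInner g dp i m) dp

-- A's three sequential while-loops, fused into one recursion on (i, j): the first loop runs
-- while i>0 and j>0, then exactly one of the two straight loops runs.  The loops take exactly
-- i + j steps, so they are transcribed with fuel i + j, recursing structurally on the fuel
-- (the fuel-0 case is never reached before (0,0)).
def btA (dp : List (List Int)) : Nat → Nat → Nat → List String → List String
  | 0, _, _, path => path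
  | f + 1, i + 1, j + 1, path =>
      if getC dp (i + 1) j > getC dp i (j + 1) then btA dp f (i + 1) j (path ++ [cvtPF (i + 1) j])
      else btA dp f i (j + 1) (path ++ [cvtPF i (j + 1)])
  | f + 1, i + 1, 0, path => btA dp f i 0 (path ++ [cvtPF i 0])
  | f + 1, 0, j + 1, path => btA dp f 0 j (path ++ [cvtPF 0 j])
  | _ + 1, 0, 0, path => path

def maxScoreDP (grid : List (List Int)) : Int × List String :=
  let rows := grid.length
  let cols := (grid.headD []).length
  let g := gridF grid
  let dp0 := List.replicate rows (List.replicate cols 0)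
  let dp1 := setC dp0 0 0 (g 0 0)
  let dp := aMain g (aRowFill g (aColFill g dp1 (rows - 1)) (cols - 1)) (rows - 1) (cols - 1)
  (getC dp (rows - 1) (cols - 1),
   (btA dp (rows - 1 + (cols - 1)) (rows - 1) (cols - 1)
     [cvtPF (rows - 1) (cols - 1)]).reverse)

-- ===== PORT B =====
-- row 0: row = [0]*cols; row[0] = grid[0][0]; for j in range(1, cols): row[j] = row[j-1] + grid[0][j]
def bRow0 (g : Nat → Nat → Int) (C m : Nat) : List Int :=
  (List.range' 1 m).foldl (fun row j => row.set j (row.getD (j - 1) 0 + g 0 j))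
    ((List.replicate C 0).set 0 (g 0 0))

-- one row of B's fill: returns (row i, par); par[j] = True means "reached from above"
def bStep (g : Nat → Nat → Int) (prev : List Int) (i C m : Nat) : List Int × List Bool :=
  (List.range' 1 m).foldl
    (fun rp j =>
      if prev.getD j 0 ≥ rp.1.getD (j - 1) 0 then
        (rp.1.set j (g i j + prev.getD j 0), rp.2.set j true)
      else
        (rp.1.set j (g i j + rp.1.getD (j - 1) 0), rp.2))
    ((prev.getD 0 0 + g i 0) :: List.replicate (C - 1) 0,
     true :: List.replicate (C - 1) false)

-- outer fill: state = (current dp row, parent matrix built so far); parent row i is appended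
def bMain (g : Nat → Nat → Int) (C n m : Nat) : List Int × List (List Bool) :=
  (List.range' 1 n).foldl
    (fun st i =>
      let rp := bStep g st.1 i C m
      (rp.1, st.2 ++ [rp.2]))
    (bRow0 g C m, [List.replicate C false])

-- while i or j: if parent[i][j]: i -= 1 else: j -= 1; append.  Like btA, transcribed with
-- fuel i + j (the walk takes exactly i + j steps).  The two branches marked "unreachable"
-- cannot fire for the parent matrix bMain builds (column-0 parents are True, row-0 parents
-- are False); Python never reaches them either.
def btB (p : List (List Bool)) : Nat → Nat → Nat → List String → List String
  | 0, _, _, path => path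
  | f + 1, i + 1, j + 1, path =>
      if (p.getD (i + 1) []).getD (j + 1) false then btB p f i (j + 1) (path ++ [cvtPF i (j + 1)])
      else btB p f (i + 1) j (path ++ [cvtPF (i + 1) j])
  | f + 1, i + 1, 0, path =>
      if (p.getD (i + 1) []).getD 0 false then btB p f i 0 (path ++ [cvtPF i 0])
      else path  -- else unreachable
  | f + 1, 0, j + 1, path =>
      if (p.getD 0 []).getD (j + 1) false then path
      else btB p f 0 j (path ++ [cvtPF 0 j])  -- then unreachable
  | _ + 1, 0, 0, path => path

def maxScoreDP_alt (grid : List (List Int)) : Int × List String :=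
  let rows := grid.length
  let cols := (grid.headD []).length
  let g := gridF grid
  let st := bMain g cols (rows - 1) (cols - 1)
  (st.1.getD (cols - 1) 0,
   (btB st.2 (rows - 1 + (cols - 1)) (rows - 1) (cols - 1)
     [cvtPF (rows - 1) (cols - 1)]).reverse)

-- ===== PRECONDITION & SPEC =====
-- Pre_ excludes exactly the inputs where Python A raises IndexError: the empty grid, an empty
-- first row, or a later row shorter than the first (B raises there too).
def Pre_maxScoreDP (grid : List (List Int)) : Prop :=
  0 < (grid.headD []).length ∧ ∀ r ∈ grid, (grid.headD []).length ≤ r.length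
instance (grid : List (List Int)) : Decidable (Pre_maxScoreDP grid) := by
  unfold Pre_maxScoreDP; infer_instance

def pvWitness_maxScoreDP : List (List Int) := [[1, 2], [3, 4]]

def Spec_maxScoreDP (grid : List (List Int)) (out : Int × List String) : Prop := out = maxScoreDP_alt grid
instance (grid : List (List Int)) (out : Int × List String) : Decidable (Spec_maxScoreDP grid out) := by unfold Spec_maxScoreDP; infer_instance

-- ===== CLAIM (what is proved, stated in full; the proofs are below) =====
def Claim_equal_maxScoreDP : Prop := ∀ (grid : List (List Int)), Dom_maxScoreDP grid → Pre_maxScoreDP grid → Spec_maxScoreDP grid (maxScoreDP grid)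

-- ===== LEMMAS AND PROOFS =====

-- the mathematical dp recurrence both fills compute
def dpF (g : Nat → Nat → Int) : Nat → Nat → Int
  | 0, 0 => g 0 0
  | i + 1, 0 => dpF g i 0 + g (i + 1) 0
  | 0, j + 1 => dpF g 0 j + g 0 (j + 1)
  | i + 1, j + 1 => g (i + 1) (j + 1) + max (dpF g i (j + 1)) (dpF g (i + 1) j)

lemma range1_concat (n : Nat) : List.range' 1 (n + 1) = List.range' 1 n ++ [n + 1] := by
  rw [List.range'_concat]; simp [Nat.add_comm]

-- shape invariant: R rows, each of length C
def Sh (dp : List (List Int)) (R C : Nat) : Prop := dp.length = R ∧ ∀ r ∈ dp, r.length = C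

lemma getD_set {α : Type} (xs : List α) (k : Nat) (v d : α) (hk : k < xs.length) (a : Nat) :
    (xs.set k v).getD a d = if a = k then v else xs.getD a d := by
  by_cases h : a = k
  · subst h
    rw [if_pos rfl, List.getD_eq_getElem?_getD, List.getElem?_set_self hk]; rfl
  · rw [if_neg h, List.getD_eq_getElem?_getD, List.getElem?_set_ne (by omega),
      ← List.getD_eq_getElem?_getD]

lemma getD_mem (xs : List (List Int)) (i : Nat) (hi : i < xs.length) : xs.getD i [] ∈ xs := by
  rw [List.getD_eq_getElem?_getD, List.getElem?_eq_getElem hi]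
  exact List.getElem_mem hi

lemma sh_setC {dp : List (List Int)} {R C : Nat} (h : Sh dp R C) (i j : Nat) (v : Int)
    (hi : i < R) : Sh (setC dp i j v) R C := by
  refine ⟨by simp [setC, h.1], ?_⟩
  intro r hr
  rcases List.mem_or_eq_of_mem_set hr with h' | rfl
  · exact h.2 r h'
  · rw [List.length_set]
    exact h.2 _ (getD_mem dp i (h.1 ▸ hi))

lemma getC_setC {dp : List (List Int)} {R C : Nat} (h : Sh dp R C) {i j : Nat} (v : Int)
    (hi : i < R) (hj : j < C) (a b : Nat) :
    getC (setC dp i j v) a b = if a = i ∧ b = j then v else getC dp a b := by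
  have hlen : i < dp.length := h.1 ▸ hi
  unfold getC setC
  rw [getD_set dp i _ [] hlen]
  by_cases hai : a = i
  · subst hai
    rw [if_pos rfl]
    have hrow : j < (dp.getD a []).length := by
      rw [h.2 _ (getD_mem dp a hlen)]; exact hj
    rw [getD_set _ j v 0 hrow]
    by_cases hbj : b = j <;> simp [hbj]
  · rw [if_neg hai, if_neg (by tauto)]

lemma getD_rep {α : Type} (d : α) (C b : Nat) : (List.replicate C d).getD b d = d := by
  rw [List.getD_eq_getElem?_getD, List.getElem?_replicate]
  split_ifs <;> rfl

lemma getC_rep (R C a b : Nat) : getC (List.replicate R (List.replicate C 0)) a b = 0 := by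
  unfold getC
  have h1 : (List.replicate R (List.replicate C (0:Int))).getD a [] = List.replicate C (0:Int)
      ∨ (List.replicate R (List.replicate C (0:Int))).getD a [] = [] := by
    rw [List.getD_eq_getElem?_getD, List.getElem?_replicate]
    split_ifs <;> simp
  rcases h1 with h | h <;> simp only [h] <;> simp

lemma sh_rep (R C : Nat) : Sh (List.replicate R (List.replicate C 0)) R C := by
  refine ⟨by simp, ?_⟩
  intro r hr
  rw [List.eq_of_mem_replicate hr]
  simp

lemma getD_append_one {α : Type} (xs : List α) (x : α) (d : α) (a : Nat) :
    (xs ++ [x]).getD a d = if a < xs.length then xs.getD a d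
      else if a = xs.length then x else d := by
  by_cases h : a < xs.length
  · rw [if_pos h, List.getD_eq_getElem?_getD, List.getElem?_append_left h,
      ← List.getD_eq_getElem?_getD]
  · rw [if_neg h, List.getD_eq_getElem?_getD, List.getElem?_append_right (by omega)]
    by_cases h2 : a = xs.length
    · subst h2; simp
    · rw [if_neg h2]
      have : a - xs.length ≥ 1 := by omega
      rcases Nat.exists_eq_add_of_le this with ⟨k, hk⟩
      rw [show a - xs.length = k + 1 from by omega]
      simp

lemma colFill_char (g : Nat → Nat → Int) (R C : Nat) (hR : 0 < R) (hC : 0 < C) : ∀ n, n < R →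
    Sh (aColFill g (setC (List.replicate R (List.replicate C 0)) 0 0 (g 0 0)) n) R C ∧
    ∀ a b, getC (aColFill g (setC (List.replicate R (List.replicate C 0)) 0 0 (g 0 0)) n) a b
      = if b = 0 ∧ a ≤ n then dpF g a 0 else 0 := by
  intro n
  induction n with
  | zero =>
    intro _
    simp only [aColFill, List.range'_zero, List.foldl_nil]
    refine ⟨sh_setC (sh_rep R C) 0 0 _ hR, ?_⟩
    intro a b
    rw [getC_setC (sh_rep R C) _ hR hC]
    simp only [getC_rep, Nat.le_zero]
    by_cases ha : a = 0 <;> by_cases hb : b = 0 <;> simp [ha, hb, dpF]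
  | succ n ih =>
    intro hn
    obtain ⟨ihSh, ihG⟩ := ih (by omega)
    have hstep : aColFill g (setC (List.replicate R (List.replicate C 0)) 0 0 (g 0 0)) (n + 1)
        = setC (aColFill g (setC (List.replicate R (List.replicate C 0)) 0 0 (g 0 0)) n)
            (n + 1) 0
            (getC (aColFill g (setC (List.replicate R (List.replicate C 0)) 0 0 (g 0 0)) n)
              (n + 1 - 1) 0 + g (n + 1) 0) := by
      simp [aColFill, range1_concat]
    rw [hstep]
    refine ⟨sh_setC ihSh _ _ _ hn, ?_⟩
    intro a b
    rw [getC_setC ihSh _ hn hC]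
    simp only [Nat.add_sub_cancel, ihG]
    by_cases ha : a = n + 1 ∧ b = 0
    · simp [ha.1, ha.2, dpF]
    · rw [if_neg ha]
      split_ifs <;> first | rfl | omega

lemma rowFill_char (g : Nat → Nat → Int) (R C N : Nat) (hR : 0 < R) (hC : 0 < C)
    (hN : N < R) : ∀ m, m < C →
    Sh (aRowFill g (aColFill g (setC (List.replicate R (List.replicate C 0)) 0 0 (g 0 0)) N) m)
      R C ∧
    ∀ a b,
      getC (aRowFill g (aColFill g (setC (List.replicate R (List.replicate C 0)) 0 0 (g 0 0)) N)
          m) a b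
      = if b = 0 ∧ a ≤ N then dpF g a 0
        else if a = 0 ∧ b ≤ m then dpF g 0 b else 0 := by
  intro m
  induction m with
  | zero =>
    intro _
    obtain ⟨hSh, hG⟩ := colFill_char g R C hR hC N hN
    simp only [aRowFill, List.range'_zero, List.foldl_nil]
    refine ⟨hSh, ?_⟩
    intro a b
    rw [hG]
    simp only [Nat.le_zero]
    split_ifs <;> first | rfl | omega
  | succ m ih =>
    intro hm
    obtain ⟨ihSh, ihG⟩ := ih (by omega)
    have hstep : aRowFill g
          (aColFill g (setC (List.replicate R (List.replicate C 0)) 0 0 (g 0 0)) N) (m + 1)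
        = setC (aRowFill g
            (aColFill g (setC (List.replicate R (List.replicate C 0)) 0 0 (g 0 0)) N) m)
            0 (m + 1)
            (getC (aRowFill g
              (aColFill g (setC (List.replicate R (List.replicate C 0)) 0 0 (g 0 0)) N) m)
              0 (m + 1 - 1) + g 0 (m + 1)) := by
      simp [aRowFill, range1_concat]
    rw [hstep]
    refine ⟨sh_setC ihSh _ _ _ hR, ?_⟩
    intro a b
    rw [getC_setC ihSh _ hR hm]
    simp only [Nat.add_sub_cancel, ihG]
    by_cases ha : a = 0 ∧ b = m + 1
    · obtain ⟨h1, h2⟩ := ha; subst h1; subst h2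
      by_cases hm0 : m = 0 <;> simp [hm0, dpF]
    · rw [if_neg ha]
      split_ifs <;> first | rfl | omega

lemma inner_char (g : Nat → Nat → Int) (R C N M i : Nat) (dp : List (List Int))
    (hi : 1 ≤ i) (hiN : i ≤ N) (hN : N < R) (hM : M < C) (hSh : Sh dp R C)
    (hdp : ∀ a b, getC dp a b = if b = 0 ∧ a ≤ N then dpF g a 0
        else if a = 0 ∧ b ≤ M then dpF g 0 b
        else if 1 ≤ a ∧ a ≤ i - 1 ∧ 1 ≤ b ∧ b ≤ M then dpF g a b else 0) :
    ∀ m, m ≤ M →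
    Sh (aInner g dp i m) R C ∧
    ∀ a b, getC (aInner g dp i m) a b
      = if b = 0 ∧ a ≤ N then dpF g a 0
        else if a = 0 ∧ b ≤ M then dpF g 0 b
        else if 1 ≤ a ∧ a ≤ i - 1 ∧ 1 ≤ b ∧ b ≤ M then dpF g a b
        else if a = i ∧ 1 ≤ b ∧ b ≤ m then dpF g a b else 0 := by
  intro m
  induction m with
  | zero =>
    intro _
    simp only [aInner, List.range'_zero, List.foldl_nil]
    refine ⟨hSh, ?_⟩
    intro a b
    rw [hdp]
    split_ifs <;> first | rfl | omega
  | succ m ihm =>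
    intro hm
    obtain ⟨ihSh, ih⟩ := ihm (by omega)
    have hstep : aInner g dp i (m + 1)
        = setC (aInner g dp i m) i (m + 1)
            (g i (m + 1) + max (getC (aInner g dp i m) (i - 1) (m + 1))
              (getC (aInner g dp i m) i (m + 1 - 1))) := by
      simp [aInner, range1_concat]
    rw [hstep]
    refine ⟨sh_setC ihSh _ _ _ (by omega), ?_⟩
    intro a b
    rw [getC_setC ihSh _ (by omega) (by omega)]
    simp only [Nat.add_sub_cancel]
    have hX : getC (aInner g dp i m) (i - 1) (m + 1) = dpF g (i - 1) (m + 1) := by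
      rw [ih]
      split_ifs <;> first | rfl | omega | simp_all
    have hY : getC (aInner g dp i m) i m = dpF g i m := by
      rw [ih]
      split_ifs <;> first | rfl | omega | simp_all
    by_cases hab : a = i ∧ b = m + 1
    · obtain ⟨h1, h2⟩ := hab; subst h1; subst h2
      rw [if_pos ⟨rfl, rfl⟩, hX, hY,
        if_neg (by omega), if_neg (by omega), if_neg (by omega), if_pos (by omega)]
      obtain ⟨i', rfl⟩ : ∃ i', a = i' + 1 := ⟨a - 1, by omega⟩
      simp [dpF]
    · rw [if_neg hab, ih a b]
      split_ifs <;> first | rfl | omega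

lemma main_char (g : Nat → Nat → Int) (R C N M : Nat) (hR : 0 < R) (hC : 0 < C)
    (hN : N < R) (hM : M < C) : ∀ n, n ≤ N →
    Sh (aMain g
      (aRowFill g (aColFill g (setC (List.replicate R (List.replicate C 0)) 0 0 (g 0 0)) N) M)
      n M) R C ∧
    ∀ a b, getC (aMain g
        (aRowFill g (aColFill g (setC (List.replicate R (List.replicate C 0)) 0 0 (g 0 0)) N) M)
        n M) a b
      = if b = 0 ∧ a ≤ N then dpF g a 0
        else if a = 0 ∧ b ≤ M then dpF g 0 b
        else if 1 ≤ a ∧ a ≤ n ∧ 1 ≤ b ∧ b ≤ M then dpF g a b else 0 := by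
  intro n
  induction n with
  | zero =>
    intro _
    obtain ⟨hSh, hG⟩ := rowFill_char g R C N hR hC hN M hM
    simp only [aMain, List.range'_zero, List.foldl_nil]
    refine ⟨hSh, ?_⟩
    intro a b
    rw [hG]
    split_ifs <;> first | rfl | omega
  | succ n ih =>
    intro hn
    obtain ⟨ihSh, ihG⟩ := ih (by omega)
    have hstep : aMain g
          (aRowFill g (aColFill g (setC (List.replicate R (List.replicate C 0)) 0 0 (g 0 0)) N)
            M) (n + 1) M
        = aInner g (aMain g
            (aRowFill g (aColFill g (setC (List.replicate R (List.replicate C 0)) 0 0 (g 0 0))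
              N) M) n M) (n + 1) M := by
      simp [aMain, range1_concat]
    rw [hstep]
    obtain ⟨hSh', hG'⟩ := inner_char g R C N M (n + 1) _ (by omega) hn hN hM ihSh
      (fun a b => by rw [ihG]; simp) M le_rfl
    refine ⟨hSh', ?_⟩
    intro a b
    rw [hG']
    simp only [Nat.add_sub_cancel]
    split_ifs <;> first | rfl | omega

lemma dpA_char (g : Nat → Nat → Int) (R C N M : Nat) (hR : 0 < R) (hC : 0 < C)
    (hN : N < R) (hM : M < C) : ∀ a b, a ≤ N → b ≤ M →
    getC (aMain g
      (aRowFill g (aColFill g (setC (List.replicate R (List.replicate C 0)) 0 0 (g 0 0)) N) M)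
      N M) a b = dpF g a b := by
  intro a b ha hb
  rw [(main_char g R C N M hR hC hN hM N le_rfl).2]
  split_ifs <;> first | rfl | omega | simp_all

lemma cons_rep_getD {α : Type} (x d : α) (k b : Nat) :
    ((x :: List.replicate k d).getD b d) = if b = 0 then x else d := by
  cases b with
  | zero => simp
  | succ b =>
    simp only [List.getD_cons_succ]
    rw [getD_rep]
    simp

lemma bRow0_char (g : Nat → Nat → Int) (C : Nat) (hC : 0 < C) : ∀ m, m < C →
    (bRow0 g C m).length = C ∧
    ∀ b, (bRow0 g C m).getD b 0 = if b ≤ m then dpF g 0 b else 0 := by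
  intro m
  induction m with
  | zero =>
    intro _
    refine ⟨by simp [bRow0], ?_⟩
    intro b
    simp only [bRow0, List.range'_zero, List.foldl_nil]
    rw [getD_set _ 0 _ 0 (by simp [hC])]
    simp only [Nat.le_zero, getD_rep]
    by_cases hb : b = 0 <;> simp [hb, dpF]
  | succ m ih =>
    intro hm
    obtain ⟨ihL, ihG⟩ := ih (by omega)
    have hstep : bRow0 g C (m + 1)
        = (bRow0 g C m).set (m + 1) ((bRow0 g C m).getD (m + 1 - 1) 0 + g 0 (m + 1)) := by
      simp [bRow0, range1_concat]
    rw [hstep]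
    refine ⟨by simp [ihL], ?_⟩
    intro b
    rw [getD_set _ (m + 1) _ 0 (by omega)]
    simp only [Nat.add_sub_cancel, ihG]
    by_cases hb : b = m + 1
    · simp [hb, dpF]
    · rw [if_neg hb]
      split_ifs <;> first | rfl | omega

lemma bStep_char (g : Nat → Nat → Int) (C i m : Nat) (prev : List Int)
    (hi : 1 ≤ i) (hC : 0 < C) (hm : m < C)
    (hprev : ∀ b, prev.getD b 0 = if b ≤ m then dpF g (i - 1) b else 0) :
    ∀ mm, mm ≤ m →
      (bStep g prev i C mm).1.length = C ∧
      (bStep g prev i C mm).2.length = C ∧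
      (∀ b, (bStep g prev i C mm).1.getD b 0 = if b ≤ mm then dpF g i b else 0) ∧
      (∀ b, (bStep g prev i C mm).2.getD b false
          = if b = 0 then true
            else if b ≤ mm then decide (dpF g (i - 1) b ≥ dpF g i (b - 1)) else false) := by
  intro mm
  induction mm with
  | zero =>
    intro _
    obtain ⟨i', rfl⟩ : ∃ i', i = i' + 1 := ⟨i - 1, by omega⟩
    refine ⟨by simp [bStep]; omega, by simp [bStep]; omega, ?_, ?_⟩
    · intro b
      simp only [bStep, List.range'_zero, List.foldl_nil]
      rw [cons_rep_getD]
      rw [show prev.getD 0 0 = dpF g (i' + 1 - 1) 0 from by rw [hprev]; simp]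
      by_cases hb : b = 0 <;> simp [hb, dpF]
    · intro b
      simp only [bStep, List.range'_zero, List.foldl_nil]
      rw [cons_rep_getD]
      by_cases hb : b = 0 <;> simp [hb]
  | succ mm ihm =>
    intro hmm
    obtain ⟨ihL1, ihL2, ih1, ih2⟩ := ihm (by omega)
    have hstep : bStep g prev i C (mm + 1)
        = if prev.getD (mm + 1) 0 ≥ (bStep g prev i C mm).1.getD (mm + 1 - 1) 0 then
            ((bStep g prev i C mm).1.set (mm + 1) (g i (mm + 1) + prev.getD (mm + 1) 0),
             (bStep g prev i C mm).2.set (mm + 1) true)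
          else
            ((bStep g prev i C mm).1.set (mm + 1)
              (g i (mm + 1) + (bStep g prev i C mm).1.getD (mm + 1 - 1) 0),
             (bStep g prev i C mm).2) := by
      simp [bStep, range1_concat]
    have hprev1 : prev.getD (mm + 1) 0 = dpF g (i - 1) (mm + 1) := by rw [hprev]; simp [hmm]
    have hP1 : (bStep g prev i C mm).1.getD (mm + 1 - 1) 0 = dpF g i mm := by
      rw [Nat.add_sub_cancel, ih1]; simp
    have hP1' : (bStep g prev i C mm).1.getD mm 0 = dpF g i mm := by
      rw [ih1]; simp
    have hcond : (prev.getD (mm + 1) 0 ≥ (bStep g prev i C mm).1.getD (mm + 1 - 1) 0)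
        ↔ (dpF g (i - 1) (mm + 1) ≥ dpF g i mm) := by rw [hprev1, hP1]
    obtain ⟨i', rfl⟩ : ∃ i', i = i' + 1 := ⟨i - 1, by omega⟩
    by_cases hc : dpF g (i' + 1 - 1) (mm + 1) ≥ dpF g (i' + 1) mm
    · rw [hstep, if_pos (hcond.mpr hc)]
      refine ⟨by simp [ihL1], by simp [ihL2], ?_, ?_⟩
      · intro b
        rw [getD_set _ (mm + 1) _ 0 (by omega)]
        by_cases hb : b = mm + 1
        · subst hb
          rw [if_pos rfl, hprev1, if_pos (by omega)]
          simp only [Nat.add_sub_cancel] at hc ⊢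
          simp [dpF]; omega
        · rw [if_neg hb, ih1]
          split_ifs <;> first | rfl | omega
      · intro b
        rw [getD_set _ (mm + 1) _ false (by omega)]
        by_cases hb : b = mm + 1
        · subst hb
          simp only [Nat.add_sub_cancel] at hc
          simp [hc]
        · rw [if_neg hb, ih2]
          split_ifs <;> first | rfl | omega
    · rw [hstep, if_neg (fun h => hc (hcond.mp h))]
      refine ⟨by simp [ihL1], ihL2, ?_, ?_⟩
      · intro b
        rw [getD_set _ (mm + 1) _ 0 (by omega)]
        by_cases hb : b = mm + 1
        · subst hb
          rw [if_pos rfl, hP1, if_pos (by omega)]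
          simp only [Nat.add_sub_cancel] at hc ⊢
          simp [dpF]; omega
        · rw [if_neg hb, ih1]
          split_ifs <;> first | rfl | omega
      · intro b
        by_cases hb : b = mm + 1
        · subst hb
          simp only [Nat.add_sub_cancel] at hc
          rw [ih2]
          simp [hc]
        · rw [ih2]
          split_ifs <;> first | rfl | omega

lemma bMain_char (g : Nat → Nat → Int) (C m : Nat) (hC : 0 < C) (hm : m < C) : ∀ n,
    (∀ b, (bMain g C n m).1.getD b 0 = if b ≤ m then dpF g n b else 0) ∧
    (bMain g C n m).2.length = n + 1 ∧
    (∀ a b, ((bMain g C n m).2.getD a []).getD b false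
        = if 1 ≤ a ∧ a ≤ n then
            (if b = 0 then true
             else if b ≤ m then decide (dpF g (a - 1) b ≥ dpF g a (b - 1)) else false)
          else false) := by
  intro n
  induction n with
  | zero =>
    refine ⟨?_, by simp [bMain], ?_⟩
    · intro b
      simp only [bMain, List.range'_zero, List.foldl_nil]
      exact (bRow0_char g C hC m hm).2 b
    · intro a b
      simp only [bMain, List.range'_zero, List.foldl_nil]
      cases a with
      | zero => simp
      | succ a => simp
  | succ n ih =>
    obtain ⟨ih1, ihL, ih2⟩ := ih
    have hstep : bMain g C (n + 1) m
        = ((bStep g (bMain g C n m).1 (n + 1) C m).1,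
           (bMain g C n m).2 ++ [(bStep g (bMain g C n m).1 (n + 1) C m).2]) := by
      simp [bMain, range1_concat]
    obtain ⟨hsL1, hsL2, hs1, hs2⟩ := bStep_char g C (n + 1) m (bMain g C n m).1 (by omega) hC hm
      (fun b => by rw [ih1 b]; simp) m le_rfl
    refine ⟨?_, ?_, ?_⟩
    · intro b
      rw [hstep]
      exact hs1 b
    · rw [hstep]
      simp [ihL]
    · intro a b
      rw [hstep]
      simp only [getD_append_one _ _ [] a, ihL]
      by_cases ha : a < n + 1
      · rw [if_pos ha, ih2 a b]
        split_ifs <;> first | rfl | omega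
      · rw [if_neg ha]
        by_cases ha2 : a = n + 1
        · subst ha2
          rw [if_pos rfl, hs2 b]
          simp only [Nat.add_sub_cancel]
          split_ifs <;> first | rfl | omega
        · rw [if_neg ha2]
          simp only [List.getD_nil]
          split_ifs <;> first | rfl | omega

lemma bt_eq (g : Nat → Nat → Int) (N M : Nat) (dp : List (List Int)) (p : List (List Bool))
    (hdp : ∀ a b, a ≤ N → b ≤ M → getC dp a b = dpF g a b)
    (hp : ∀ a b, (p.getD a []).getD b false = if 1 ≤ a ∧ a ≤ N then
            (if b = 0 then true
             else if b ≤ M then decide (dpF g (a - 1) b ≥ dpF g a (b - 1)) else false)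
          else false) :
    ∀ k i j path, i + j ≤ k → i ≤ N → j ≤ M → btA dp k i j path = btB p k i j path := by
  intro k
  induction k with
  | zero =>
    intro i j path hk hi hj
    simp [btA, btB]
  | succ k ih =>
    intro i j path hk hi hj
    rcases i with _ | ii
    · rcases j with _ | jj
      · simp [btA, btB]
      · have hp0 : (p.getD 0 []).getD (jj + 1) false = false := by rw [hp]; simp
        have eA : btA dp (k + 1) 0 (jj + 1) path = btA dp k 0 jj (path ++ [cvtPF 0 jj]) := by
          simp [btA]
        have eB : btB p (k + 1) 0 (jj + 1) path = btB p k 0 jj (path ++ [cvtPF 0 jj]) := by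
          simp only [btB, hp0]; simp
        rw [eA, eB]
        exact ih 0 jj _ (by omega) (by omega) (by omega)
    · rcases j with _ | jj
      · have hp0 : (p.getD (ii + 1) []).getD 0 false = true := by rw [hp]; simp [hi]
        have eA : btA dp (k + 1) (ii + 1) 0 path = btA dp k ii 0 (path ++ [cvtPF ii 0]) := by
          simp [btA]
        have eB : btB p (k + 1) (ii + 1) 0 path = btB p k ii 0 (path ++ [cvtPF ii 0]) := by
          simp only [btB, hp0]; simp
        rw [eA, eB]
        exact ih ii 0 _ (by omega) (by omega) (by omega)
      · have hpv : (p.getD (ii + 1) []).getD (jj + 1) false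
            = decide (dpF g ii (jj + 1) ≥ dpF g (ii + 1) jj) := by
          rw [hp]
          simp [hi, hj]
        have hA1 : getC dp (ii + 1) jj = dpF g (ii + 1) jj := hdp _ _ hi (by omega)
        have hA2 : getC dp ii (jj + 1) = dpF g ii (jj + 1) := hdp _ _ (by omega) hj
        by_cases hgt : dpF g (ii + 1) jj > dpF g ii (jj + 1)
        · have eA : btA dp (k + 1) (ii + 1) (jj + 1) path
              = btA dp k (ii + 1) jj (path ++ [cvtPF (ii + 1) jj]) := by
            simp [btA, hA1, hA2, hgt]
          have eB : btB p (k + 1) (ii + 1) (jj + 1) path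
              = btB p k (ii + 1) jj (path ++ [cvtPF (ii + 1) jj]) := by
            have : (p.getD (ii + 1) []).getD (jj + 1) false = false := by
              rw [hpv]; simp; omega
            simp only [btB, this]; simp
          rw [eA, eB]
          exact ih (ii + 1) jj _ (by omega) (by omega) (by omega)
        · have eA : btA dp (k + 1) (ii + 1) (jj + 1) path
              = btA dp k ii (jj + 1) (path ++ [cvtPF ii (jj + 1)]) := by
            simp [btA, hA1, hA2, hgt]
          have eB : btB p (k + 1) (ii + 1) (jj + 1) path
              = btB p k ii (jj + 1) (path ++ [cvtPF ii (jj + 1)]) := by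
            have : (p.getD (ii + 1) []).getD (jj + 1) false = true := by
              rw [hpv]; simp; omega
            simp only [btB, this]; simp
          rw [eA, eB]
          exact ih ii (jj + 1) _ (by omega) (by omega) (by omega)

-- ===== VERDICT (by name: the statement is the Claim_ definition above) =====
theorem maxScoreDP_spec : Claim_equal_maxScoreDP := by
  intro grid _ hpre
  obtain ⟨hC0, _⟩ := hpre
  have hR0 : 0 < grid.length := by
    cases grid with
    | nil => simp at hC0
    | cons h t => simp
  show maxScoreDP grid = maxScoreDP_alt grid
  simp only [maxScoreDP, maxScoreDP_alt, Prod.mk.injEq]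
  set g : Nat → Nat → Int := gridF grid with hg
  set R := grid.length with hRdef
  set C := (grid.headD []).length with hCdef
  set N := R - 1 with hNdef
  set M := C - 1 with hMdef
  have hN : N < R := by omega
  have hM : M < C := by omega
  have hdp := dpA_char g R C N M hR0 hC0 hN hM
  obtain ⟨hb1, _, hb2⟩ := bMain_char g C M hC0 hM N
  refine ⟨?_, ?_⟩
  · rw [hdp N M le_rfl le_rfl, hb1 M]
    simp
  · exact congrArg List.reverse
      (bt_eq g N M _ _ hdp hb2 (N + M) N M _ le_rfl le_rfl le_rfl)
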